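-- pv_equiv track=rewrite | github.com/aaronsb/roguebash | engine/generator/factions.py | _index_factions_by_area
-- ===== SOURCE A (Python) =====
-- from typing import Any
--
-- def _index_factions_by_area(
--     factions: dict[str, dict[str, Any]],
-- ) -> tuple[dict[str, list[str]], dict[str, list[str]]]:
--     """Return (home_index, territory_index) mapping area_id -> [faction_id]."""
--     home: dict[str, list[str]] = {}
--     terr: dict[str, list[str]] = {}
--     for fid in sorted(factions.keys()):
--         fac = factions[fid]
--         for aid in fac.get("home_areas") or []:
--             home.setdefault(aid, []).append(fid)
--         for aid in fac.get("territories") or []: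
--             terr.setdefault(aid, []).append(fid)
--     return home, terr
-- ===== SOURCE B (Python) =====
-- def _index_factions_by_area(factions):
--     """Return (home_index, territory_index) mapping area_id -> [faction_id].
--
--     Alternative decomposition: flatten each field to (area, faction) pairs in
--     sorted-faction order, then group the pairs per first-seen area id.
--     """
--     order = sorted(factions)
--
--     def build(key):
--         pairs = [(aid, fid) for fid in order
--                  for aid in (factions[fid].get(key) or [])]
--         areas = dict.fromkeys(aid for aid, _ in pairs)
--         return {a: [f for a2, f in pairs if a2 == a] for a in areas}
--
--     return build("home_areas"), build("territories")
-- ===== Notes on version B (the rewrite author's own statement) =====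
-- stated objective: alternative
-- what changed: A builds both indices incrementally with setdefault-append inside one loop over sorted faction ids; B flattens each field into a (area, faction) pair list in sorted-faction order, deduplicates area ids by first occurrence, and builds each index by collecting the bucket of every area from the pair list.
import Mathlib
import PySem

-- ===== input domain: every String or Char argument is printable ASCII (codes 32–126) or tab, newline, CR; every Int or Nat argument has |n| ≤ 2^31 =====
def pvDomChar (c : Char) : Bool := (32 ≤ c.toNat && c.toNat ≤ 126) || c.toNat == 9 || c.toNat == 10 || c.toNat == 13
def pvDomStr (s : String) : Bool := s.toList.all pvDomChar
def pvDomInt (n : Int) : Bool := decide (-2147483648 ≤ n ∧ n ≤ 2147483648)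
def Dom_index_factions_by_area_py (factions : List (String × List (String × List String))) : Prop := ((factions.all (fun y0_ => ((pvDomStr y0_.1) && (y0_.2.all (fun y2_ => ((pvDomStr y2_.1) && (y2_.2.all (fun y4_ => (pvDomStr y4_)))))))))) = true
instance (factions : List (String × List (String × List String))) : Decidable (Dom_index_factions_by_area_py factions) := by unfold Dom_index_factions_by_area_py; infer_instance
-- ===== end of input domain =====

-- B re-implements the indexing as flatten-to-(area,faction)-pairs then group-per-first-seen-area,
-- instead of A's single loop that setdefault-appends into two dicts (objective: alternative; return value only).

-- ===== PORT A =====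
def index_factions_by_area_py (factions : List (String × List (String × List String))) : (List (String × List String)) × (List (String × List String)) :=
  let fd := PySem.Dict.mk factions
  let st := (PySem.List.sorted fd.keys (fun x => x) false).foldl
    (fun (st : PySem.Dict String (List String) × PySem.Dict String (List String)) fid =>
      let fac := PySem.Dict.mk (fd.getD fid [])
      let home := (fac.getD "home_areas" []).foldl
        (fun h aid => h.modify aid [] (fun l => l ++ [fid])) st.1
      let terr := (fac.getD "territories" []).foldl
        (fun t aid => t.modify aid [] (fun l => l ++ [fid])) st.2
      (home, terr))
    (PySem.Dict.empty, PySem.Dict.empty)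
  (st.1.items, st.2.items)

-- ===== PORT B =====
-- factions[fid].get(key) or []
def pvAreas (factions : List (String × List (String × List String))) (fid key : String) : List String :=
  (PySem.Dict.mk ((PySem.Dict.mk factions).getD fid [])).getD key []

-- [(aid, fid) for fid in order for aid in (factions[fid].get(key) or [])]
def pvPairs (factions : List (String × List (String × List String))) (order : List String) (key : String) : List (String × String) :=
  order.flatMap (fun fid => (pvAreas factions fid key).map (fun aid => (aid, fid)))

-- [f for a2, f in pairs if a2 == a], the bucket of area a
def pvGrp (ps : List (String × String)) (a : String) : List String :=
  (ps.filter (fun p => p.1 == a)).map Prod.snd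

-- {a: [f for a2, f in pairs if a2 == a] for a in dict.fromkeys(aid for aid, _ in pairs)}
def pvGroup (pairs : List (String × String)) : List (String × List String) :=
  (PySem.List.dedup (pairs.map Prod.fst)).map (fun a => (a, pvGrp pairs a))

def index_factions_by_area_py_alt (factions : List (String × List (String × List String))) : (List (String × List String)) × (List (String × List String)) :=
  let order := PySem.List.sorted (PySem.Dict.mk factions).keys (fun x => x) false
  (pvGroup (pvPairs factions order "home_areas"), pvGroup (pvPairs factions order "territories"))

-- ===== PRECONDITION & SPEC =====
def Spec_index_factions_by_area_py (factions : List (String × List (String × List String))) (out : (List (String × List String)) × (List (String × List String))) : Prop := out = index_factions_by_area_py_alt factions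
instance (factions : List (String × List (String × List String))) (out : (List (String × List String)) × (List (String × List String))) : Decidable (Spec_index_factions_by_area_py factions out) := by unfold Spec_index_factions_by_area_py; infer_instance

-- ===== CLAIM (what is proved, stated in full; the proofs are below) =====
def Claim_equal_index_factions_by_area_py : Prop := ∀ (factions : List (String × List (String × List String))), Dom_index_factions_by_area_py factions → Spec_index_factions_by_area_py factions (index_factions_by_area_py factions)

-- ===== LEMMAS AND PROOFS =====

-- A's setdefault(aid, []).append(fid) step, on one (area, faction) pair
def pvIns (d : PySem.Dict String (List String)) (p : String × String) : PySem.Dict String (List String) :=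
  d.modify p.1 [] (fun l => l ++ [p.2])

theorem pvGrp_append (ps : List (String × String)) (p : String × String) (x : String) :
    pvGrp (ps ++ [p]) x = pvGrp ps x ++ (if p.1 == x then [p.2] else []) := by
  by_cases h : p.1 == x <;> simp [pvGrp, List.filter_append, h]

theorem pvFind?_beq_of_mem (l : List String) (a : String) (h : a ∈ l) :
    l.find? (fun x => x == a) = some a := by
  induction l with
  | nil => cases h
  | cons y t ih =>
      rcases List.mem_cons.mp h with h | h
      · subst h; simp
      · by_cases hy : y == a
        · simp_all
        · simp [hy, ih h]

theorem pvGet?_group (ps : List (String × String)) (a : String) :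
    (PySem.Dict.mk (pvGroup ps)).get? a
      = if a ∈ ps.map Prod.fst then some (pvGrp ps a) else none := by
  have hcomp : ((fun p : String × List String => p.1 == a)
        ∘ fun x : String => (x, pvGrp ps x)) = (fun x : String => x == a) := rfl
  unfold PySem.Dict.get? pvGroup
  rw [List.find?_map, hcomp]
  by_cases h : a ∈ ps.map Prod.fst
  · rw [pvFind?_beq_of_mem _ _ (by simpa [PySem.List.mem_dedup] using h)]
    simp [h, pvGrp]
  · rw [List.find?_eq_none.mpr ?_]
    · simp [h]
    · intro x hx
      simp only [beq_iff_eq]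
      rintro rfl
      exact h (by simpa [PySem.List.mem_dedup] using hx)

theorem pvContains_group (ps : List (String × String)) (a : String) :
    (PySem.Dict.mk (pvGroup ps)).contains a = true ↔ a ∈ ps.map Prod.fst := by
  simp only [PySem.Dict.contains, pvGroup, List.any_map, List.any_eq_true, Function.comp,
    beq_iff_eq, PySem.List.mem_dedup]
  constructor
  · rintro ⟨x, hx, rfl⟩; exact hx
  · intro h; exact ⟨a, h, rfl⟩

theorem pvGrp_eq_nil (ps : List (String × String)) (a : String)
    (h : a ∉ ps.map Prod.fst) : pvGrp ps a = [] := by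
  simp only [pvGrp, List.map_eq_nil_iff, List.filter_eq_nil_iff]
  intro p hp hba
  exact h (List.mem_map.mpr ⟨p, hp, by simpa using hba⟩)

theorem pvGetD_group (ps : List (String × String)) (a : String) :
    (PySem.Dict.mk (pvGroup ps)).getD a [] = pvGrp ps a := by
  rw [PySem.Dict.getD, pvGet?_group]
  by_cases h : a ∈ ps.map Prod.fst
  · simp [h]
  · simp [h, pvGrp_eq_nil ps a h]

theorem pvDedup_append (ks : List String) (a : String) :
    PySem.List.dedup (ks ++ [a])
      = if a ∈ ks then PySem.List.dedup ks else PySem.List.dedup ks ++ [a] := by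
  rw [PySem.List.dedup_eq_ofList, PySem.List.dedup_eq_ofList, PySem.Set.ofList_eq_foldl,
    PySem.Set.ofList_eq_foldl, List.foldl_append, List.foldl_cons, List.foldl_nil,
    ← PySem.Set.ofList_eq_foldl]
  unfold PySem.Set.add PySem.Set.contains
  by_cases h : a ∈ ks
  · rw [if_pos (by simpa [List.contains_iff_mem, PySem.Set.mem_ofList]), if_pos h]
  · rw [if_neg (by simpa [List.contains_iff_mem, PySem.Set.mem_ofList]), if_neg h]

theorem pvIns_group (ps : List (String × String)) (p : String × String) :
    (pvIns (PySem.Dict.mk (pvGroup ps)) p).items = pvGroup (ps ++ [p]) := by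
  obtain ⟨a, f⟩ := p
  have hfst : (ps ++ [(a, f)]).map Prod.fst = ps.map Prod.fst ++ [a] := by simp
  by_cases h : a ∈ ps.map Prod.fst
  · have hc : (PySem.Dict.mk (pvGroup ps)).contains a = true := (pvContains_group ps a).mpr h
    simp only [pvIns, PySem.Dict.modify, PySem.Dict.insert, hc, if_true, pvGetD_group]
    show List.map _ (pvGroup ps) = _
    unfold pvGroup
    rw [hfst, pvDedup_append, if_pos h, List.map_map]
    apply List.map_congr_left
    intro x hx
    by_cases hxa : x = a
    · subst hxa
      show (if (x == x) = true then _ else _) = (x, _)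
      rw [if_pos (by simp)]
      have := pvGrp_append ps (x, f) x
      rw [show pvGrp (ps ++ [(x, f)]) x = pvGrp ps x ++ [f] by simpa using this]
    · show (if (x == a) = true then _ else _) = (x, _)
      rw [if_neg (by simpa using hxa)]
      have := pvGrp_append ps (a, f) x
      rw [show pvGrp (ps ++ [(a, f)]) x = pvGrp ps x by
        simpa [show (a == x) = false by simp [Ne.symm hxa]] using this]
  · have hc : (PySem.Dict.mk (pvGroup ps)).contains a = false :=
      Bool.eq_false_iff.mpr (fun hb => h ((pvContains_group ps a).mp hb))
    simp only [pvIns, PySem.Dict.modify, PySem.Dict.insert, hc, Bool.false_eq_true, if_false,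
      pvGetD_group]
    show pvGroup ps ++ [(a, pvGrp ps a ++ [f])] = _
    unfold pvGroup
    rw [hfst, pvDedup_append, if_neg h, List.map_append]
    congr 1
    · apply List.map_congr_left
      intro x hx
      have hxk : x ∈ ps.map Prod.fst := by simpa [PySem.List.mem_dedup] using hx
      have hxa : a ≠ x := fun hax => h (hax ▸ hxk)
      have := pvGrp_append ps (a, f) x
      rw [show pvGrp (ps ++ [(a, f)]) x = pvGrp ps x by
        simpa [show (a == x) = false by simp [hxa]] using this]
    · have := pvGrp_append ps (a, f) a
      rw [List.map_singleton,
        show pvGrp (ps ++ [(a, f)]) a = pvGrp ps a ++ [f] by simpa using this]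

theorem pvGroup_fold (ps : List (String × String)) :
    (List.foldl pvIns PySem.Dict.empty ps).items = pvGroup ps := by
  induction ps using List.reverseRecOn with
  | nil => rfl
  | append_singleton ps p ih =>
      rw [List.foldl_append, List.foldl_cons, List.foldl_nil,
        show List.foldl pvIns PySem.Dict.empty ps = PySem.Dict.mk (pvGroup ps) from
          PySem.Dict.ext ih, pvIns_group]

theorem pvState_pair (factions : List (String × List (String × List String)))
    (l : List String) (h t : PySem.Dict String (List String)) :
    l.foldl
      (fun (st : PySem.Dict String (List String) × PySem.Dict String (List String)) fid =>
        (List.foldl (fun h aid => h.modify aid [] fun l => l ++ [fid]) st.1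
            ((PySem.Dict.mk ((PySem.Dict.mk factions).getD fid [])).getD "home_areas" []),
          List.foldl (fun h aid => h.modify aid [] fun l => l ++ [fid]) st.2
            ((PySem.Dict.mk ((PySem.Dict.mk factions).getD fid [])).getD "territories" []))) (h, t)
      = (List.foldl pvIns h (pvPairs factions l "home_areas"),
         List.foldl pvIns t (pvPairs factions l "territories")) := by
  induction l generalizing h t with
  | nil => rfl
  | cons fid rest ih =>
      simp only [List.foldl_cons, pvPairs, List.flatMap_cons, List.foldl_append, ih,
        List.foldl_map]
      rfl

-- ===== VERDICT (by name: the statement is the Claim_ definition above) =====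
theorem index_factions_by_area_py_spec : Claim_equal_index_factions_by_area_py := by
  intro factions _
  show _ = _
  simp only [index_factions_by_area_py, index_factions_by_area_py_alt]
  rw [pvState_pair]
  rw [pvGroup_fold, pvGroup_fold]
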